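-- pv_equiv track=rewrite | github.com/FAhtisham/Nucleosome-position-prediction | Transformer/utils.py | convert_seqs_to_words
-- ===== SOURCE A (Python) =====
-- def add_padding(seq, p_len):
--   seq = seq + ("P" * p_len)
--   return seq
--
-- def convert_seqs_to_words(sequences, ngram):
--   f_sequences = []
--   for i in range(len(sequences)):
--     temp = ""
--     str_ = sequences[i]
--     j=0
--     if len(str_)%ngram!=0:
--       n = len(str_)
--       while n % ngram != 0:
--         n+=1
--         str_= add_padding(str_,n-len(str_))
--     for k in range(0,len(str_)):
--       j+=1
--       if  j%ngram==0:
--         temp = temp + str_[k-ngram+1:j] + ' '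
--       #j+=3
--     f_sequences.append(temp)
--   f_sequences= [j.split() for j in f_sequences]
--   return f_sequences
-- ===== SOURCE B (Python) =====
-- def convert_seqs_to_words(sequences, ngram):
--     result = []
--     for s in sequences:
--         pad = (ngram - len(s) % ngram) % ngram
--         padded = s + "P" * pad
--         chunks = [padded[i:i + ngram] for i in range(0, len(padded), ngram)]
--         result.append([w for c in chunks for w in c.split()])
--     return result
-- ===== Notes on version B (the rewrite author's own statement) =====
-- stated objective: simpler
-- what changed: B computes the pad length in closed form ((ngram - len % ngram) % ngram) instead of A's one-character-at-a-time while loop, and extracts the chunks directly by stride slicing padded[i:i+ngram] instead of A's per-character counter loop that accumulates a space-joined temp string; the per-chunk .split() keeps A's whitespace-token semantics without the joined temp string.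
import Mathlib
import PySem

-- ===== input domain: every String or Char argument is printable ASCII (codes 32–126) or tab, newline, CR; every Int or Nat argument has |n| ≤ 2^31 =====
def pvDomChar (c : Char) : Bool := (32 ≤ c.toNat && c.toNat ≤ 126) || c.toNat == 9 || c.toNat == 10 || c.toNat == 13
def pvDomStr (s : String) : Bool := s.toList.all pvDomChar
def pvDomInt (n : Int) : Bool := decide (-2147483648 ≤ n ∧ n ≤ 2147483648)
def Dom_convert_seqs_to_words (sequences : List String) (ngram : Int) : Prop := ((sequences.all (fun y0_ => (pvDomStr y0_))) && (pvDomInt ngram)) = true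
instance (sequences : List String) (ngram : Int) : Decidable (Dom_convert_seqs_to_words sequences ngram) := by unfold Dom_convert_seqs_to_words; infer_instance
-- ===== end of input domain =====

-- B replaces A's character-at-a-time padding loop and per-character counter/accumulator loop by a
-- closed-form pad length and direct stride slicing (objective: simpler).

-- ===== PORT A =====

-- 'seq + "P" * p_len' ; "P" * p_len is PySem.List.pyRepeat on the character list (exact, '' for p_len ≤ 0)
def add_padding (seq : String) (p_len : Int) : String :=
  seq ++ String.ofList (PySem.List.pyRepeat ['P'] p_len)

-- 'while n % ngram != 0: n += 1; str_ = add_padding(str_, n - len(str_))'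
-- fuel = ngram.natAbs is a totality guard only: entered with n = len(str_) and ngram ≠ 0 the loop
-- runs at most |ngram| - 1 times, so the fuel is never exhausted on inputs admitted by Pre_.
def padWhile (ngram : Int) : Nat → Int → String → String
  | 0, _, s => s
  | fuel+1, n, s =>
    if PySem.Int.mod n ngram ≠ 0 then
      padWhile ngram fuel (n+1) (add_padding s ((n+1) - PySem.Str.len s))
    else s

def convert_seqs_to_words (sequences : List String) (ngram : Int) : List (List String) :=
  let f_sequences : List String :=
    (PySem.List.pyRange 0 sequences.length 1).foldl (fun f_sequences i =>
      let str_ := PySem.List.pyGetD sequences i ""   -- sequences[i]; i drawn from range(len(sequences)) is always in range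
      let str_ :=
        if PySem.Int.mod (PySem.Str.len str_) ngram ≠ 0 then
          padWhile ngram ngram.natAbs (PySem.Str.len str_) str_
        else str_
      let st :=
        (PySem.List.pyRange 0 (PySem.Str.len str_) 1).foldl
          (fun (st : Int × String) k =>
            ((st.1 + 1 : Int),
             if PySem.Int.mod (st.1 + 1) ngram = 0 then
               st.2 ++ PySem.Str.slice str_ (some (k - ngram + 1)) (some (st.1 + 1)) ++ " "
             else st.2))
          (0, "")
      f_sequences ++ [st.2]) []
  f_sequences.map (fun j => PySem.Str.split₀ j)

-- ===== PORT B =====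

def convert_seqs_to_words_alt (sequences : List String) (ngram : Int) : List (List String) :=
  sequences.map (fun s =>
    let pad := PySem.Int.mod (ngram - PySem.Int.mod (PySem.Str.len s) ngram) ngram
    let padded := s ++ String.ofList (PySem.List.pyRepeat ['P'] pad)
    let chunks := (PySem.List.pyRange 0 (PySem.Str.len padded) ngram).map
      (fun i => PySem.Str.slice padded (some i) (some (i + ngram)))
    chunks.flatMap (fun c => PySem.Str.split₀ c))

-- ===== PRECONDITION & SPEC =====

-- A raises ZeroDivisionError at 'len(str_) % ngram' when ngram = 0, but only if the loop body runs,
-- i.e. only if there is at least one sequence; on everything else A returns normally.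
def Pre_convert_seqs_to_words (sequences : List String) (ngram : Int) : Prop :=
  sequences = [] ∨ ngram ≠ 0
instance (sequences : List String) (ngram : Int) : Decidable (Pre_convert_seqs_to_words sequences ngram) := by
  unfold Pre_convert_seqs_to_words; infer_instance

def pvWitness_convert_seqs_to_words : List String × Int := (["ACGTA", "TT"], 3)

def Spec_convert_seqs_to_words (sequences : List String) (ngram : Int) (out : List (List String)) : Prop := out = convert_seqs_to_words_alt sequences ngram
instance (sequences : List String) (ngram : Int) (out : List (List String)) : Decidable (Spec_convert_seqs_to_words sequences ngram out) := by unfold Spec_convert_seqs_to_words; infer_instance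

-- ===== CLAIM (what is proved, stated in full; the proofs are below) =====
def Claim_equal_convert_seqs_to_words : Prop := ∀ (sequences : List String) (ngram : Int), Dom_convert_seqs_to_words sequences ngram → Pre_convert_seqs_to_words sequences ngram → Spec_convert_seqs_to_words sequences ngram (convert_seqs_to_words sequences ngram)

-- ===== LEMMAS AND PROOFS =====

lemma str_ext {a b : String} (h : a.toList = b.toList) : a = b := by
  have := congrArg String.ofList h
  simpa [String.ofList_toList] using this

-- the slices A's inner counter loop appends, over range(c, N): those at positions k with (k+1) % g == 0
def pieces (g : Int) (t : List Char) (c : Int) (N : Int) : List (List Char) :=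
  ((PySem.List.pyRange c N 1).filter (fun k => PySem.Int.mod (k + 1) g == 0)).map
    (fun k => PySem.Chars.slice t (some (k - g + 1)) (some (k + 1)))

-- go with a non-empty accumulator just prepends the reversed accumulator
lemma split_go_acc (l : List Char) : ∀ (cur : List Char) (acc : List (List Char)),
    PySem.Chars.split₀.go l cur acc = acc.reverse ++ PySem.Chars.split₀.go l cur [] := by
  induction l with
  | nil =>
    intro cur acc
    simp only [PySem.Chars.split₀.go]
    by_cases h : cur.isEmpty <;> simp [h]
  | cons c rest ih =>
    intro cur acc
    simp only [PySem.Chars.split₀.go]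
    by_cases hs : PySem.Chars.isspace c
    · by_cases h : cur.isEmpty
      · simp only [hs, h, ite_true]
        exact ih [] acc
      · simp only [hs, h, Bool.false_eq_true, ite_false, ite_true]
        rw [ih [] (cur.reverse :: acc), ih [] [cur.reverse]]
        simp
    · simp only [hs, Bool.false_eq_true, ite_false]
      exact ih _ _

-- splitting at an explicit space boundary is independent on the two sides
lemma split_go_space_append (rest : List Char) : ∀ (w : List Char) (cur : List Char) (acc : List (List Char)),
    PySem.Chars.split₀.go (w ++ ' ' :: rest) cur acc =
      PySem.Chars.split₀.go w cur acc ++ PySem.Chars.split₀.go rest [] [] := by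
  intro w
  induction w with
  | nil =>
    intro cur acc
    have hsp : PySem.Chars.isspace ' ' = true := by decide
    simp only [List.nil_append, PySem.Chars.split₀.go, hsp, ite_true]
    by_cases h : cur.isEmpty
    · simp only [h, ite_true]
      rw [split_go_acc]
    · simp only [h, Bool.false_eq_true, ite_false]
      rw [split_go_acc]
  | cons c w' ih =>
    intro cur acc
    simp only [List.cons_append, PySem.Chars.split₀.go]
    by_cases hs : PySem.Chars.isspace c <;> by_cases h : cur.isEmpty <;>
      simp only [hs, h, ite_true, ite_false, Bool.false_eq_true] <;> exact ih _ _

lemma split₀_append_space (w rest : List Char) :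
    PySem.Chars.split₀ (w ++ ' ' :: rest) = PySem.Chars.split₀ w ++ PySem.Chars.split₀ rest := by
  unfold PySem.Chars.split₀
  exact split_go_space_append rest w [] []

-- chunks joined by single spaces split into the concatenation of the chunks' own splits
lemma split₀_flatten_space (ps : List (List Char)) :
    PySem.Chars.split₀ ((ps.map (fun p => p ++ [' '])).flatten) = ps.flatMap PySem.Chars.split₀ := by
  induction ps with
  | nil => simp [PySem.Chars.split₀, PySem.Chars.split₀.go]
  | cons p ps ih =>
    simp only [List.map_cons, List.flatten_cons, List.flatMap_cons, List.append_assoc,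
      List.singleton_append]
    rw [split₀_append_space, ih]

-- A's inner counter loop appends exactly the fired slices, each followed by one space
lemma chunkFold (g : Int) (t : String) : ∀ (N : Nat) (c : Int) (u : String),
    ((PySem.List.pyRange c (c + N) 1).foldl
      (fun (st : Int × String) k =>
        ((st.1 + 1 : Int),
         if PySem.Int.mod (st.1 + 1) g = 0 then
           st.2 ++ PySem.Str.slice t (some (k - g + 1)) (some (st.1 + 1)) ++ " "
         else st.2))
      (c, u)) =
    (c + N, u ++ String.ofList (((pieces g t.toList c (c + N)).map (fun p => p ++ [' '])).flatten)) := by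
  intro N
  induction N with
  | zero =>
    intro c u
    rw [PySem.List.pyRange_one_eq_nil (by simp)]
    unfold pieces
    rw [PySem.List.pyRange_one_eq_nil (by simp)]
    apply Prod.ext
    · simp
    · apply str_ext
      simp [String.toList_append]
  | succ N ih =>
    intro c u
    have hcons : PySem.List.pyRange c (c + (N + 1 : Nat)) 1
        = c :: PySem.List.pyRange (c + 1) ((c + 1) + N) 1 := by
      rw [PySem.List.pyRange_one_cons (by push_cast; omega)]
      congr 1
      push_cast; ring
    rw [hcons, List.foldl_cons, ih]
    unfold pieces
    rw [hcons, List.filter_cons]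
    have hsp : (" " : String).toList = [' '] := by decide
    by_cases hfire : PySem.Int.mod (c + 1) g = 0
    · simp only [hfire, beq_self_eq_true, if_true, List.map_cons, List.flatten_cons]
      apply Prod.ext
      · simp only; push_cast; ring
      · simp only
        apply str_ext
        simp [String.toList_append, hsp, PySem.Str.toList_slice, List.append_assoc]
    · have : ((PySem.Int.mod (c + 1) g == 0) : Bool) = false := by
        simp [beq_iff_eq, hfire]
      simp only [hfire, this, if_false, Bool.false_eq_true, ite_false]
      apply Prod.ext
      · simp only; push_cast; ring
      · simp only

lemma pad_arith (g n : Int) (hg : 0 < g) (hn : n % g ≠ 0) :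
    ((g - (n + 1) % g) % g).toNat + 1 = ((g - n % g) % g).toNat := by
  have h0 : 0 ≤ n % g := Int.emod_nonneg n (ne_of_gt hg)
  have h1 : n % g < g := Int.emod_lt_of_pos n hg
  have hg2 : 2 ≤ g := by
    by_contra h
    have : g = 1 := by omega
    subst this
    simp at hn
  have hmod1 : (1 : Int) % g = 1 := Int.emod_eq_of_lt (by omega) (by omega)
  have hstep : (n + 1) % g = (n % g + 1) % g := by
    conv_lhs => rw [Int.add_emod, hmod1]
  have hr : (g - n % g) % g = g - n % g := Int.emod_eq_of_lt (by omega) (by omega)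
  by_cases hlast : n % g + 1 = g
  · have : (n + 1) % g = 0 := by
      rw [hstep, hlast, Int.emod_self]
    rw [this, hr]
    simp only [sub_zero, Int.emod_self]
    omega
  · have hsm : (n + 1) % g = n % g + 1 := by
      rw [hstep]
      exact Int.emod_eq_of_lt (by omega) (by omega)
    rw [hsm, hr, Int.emod_eq_of_lt (by omega) (by omega)]
    omega

-- fuel-generic characterisation of A's padding loop (0 < g)
lemma padWhile_toList (g : Int) (hg : 0 < g) : ∀ (fuel : Nat) (n : Int) (s : String),
    PySem.Str.len s = n →
    ((g - PySem.Int.mod n g) % g).toNat ≤ fuel →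
    (padWhile g fuel n s).toList
      = s.toList ++ List.replicate ((g - PySem.Int.mod n g) % g).toNat 'P' := by
  intro fuel
  induction fuel with
  | zero =>
    intro n s hlen hfuel
    have : ((g - PySem.Int.mod n g) % g).toNat = 0 := by omega
    rw [this]
    simp [padWhile]
  | succ fuel ih =>
    intro n s hlen hfuel
    rw [PySem.Int.mod_eq_emod_of_pos hg] at *
    by_cases hmod : n % g = 0
    · have hz : ((g - n % g) % g).toNat = 0 := by
        rw [hmod, sub_zero, Int.emod_self]
        rfl
      rw [hz]
      simp only [padWhile, PySem.Int.mod_eq_emod_of_pos hg, hmod, ne_eq, not_true_eq_false,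
        ite_false, if_false]
      simp
    · have hpad : add_padding s ((n + 1) - PySem.Str.len s) = s ++ String.ofList ['P'] := by
        unfold add_padding
        congr 1
        rw [hlen]
        norm_num
      have harith := pad_arith g n hg hmod
      have hlen' : PySem.Str.len (s ++ String.ofList ['P']) = n + 1 := by
        simp only [PySem.Str.len, String.toList_append, String.toList_ofList, List.length_append,
          List.length_cons, List.length_nil]
        push_cast
        rw [← hlen]
        simp [PySem.Str.len]
      have hrec := ih (n + 1) (s ++ String.ofList ['P']) hlen' (by
        rw [PySem.Int.mod_eq_emod_of_pos hg]
        omega)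
      rw [PySem.Int.mod_eq_emod_of_pos hg] at hrec
      simp only [padWhile, PySem.Int.mod_eq_emod_of_pos hg, hmod, ne_eq, not_false_eq_true,
        ite_true, if_true]
      rw [hpad, hrec]
      rw [String.toList_append, String.toList_ofList]
      have : ((g - n % g) % g).toNat = ((g - (n + 1) % g) % g).toNat + 1 := harith.symm
      rw [this, List.append_assoc]
      rfl

-- stride range in closed form
lemma stride_range (g : Int) (hg : 0 < g) (m : Nat) :
    PySem.List.pyRange 0 ((m : Int) * g) g = (List.range m).map (fun (k : Nat) => g * (k : Int)) := by
  rw [PySem.List.pyRange_of_pos 0 _ hg]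
  by_cases hm : 0 < m
  · have hlt : (0 : Int) < (m : Int) * g := by positivity
    rw [if_pos hlt]
    have hcount : (((m : Int) * g - 0 + g - 1) / g).toNat = m := by
      have h1 : ((m : Int) * g - 0 + g - 1) = (g - 1) + ((m : Int)) * g := by ring
      rw [h1, Int.add_mul_ediv_right _ _ (ne_of_gt hg),
        Int.ediv_eq_zero_of_lt (by omega) (by omega)]
      simp
    rw [hcount]
    simp only [zero_add]
  · have hm0 : m = 0 := by omega
    subst hm0
    simp

-- the fired slices of a full pass over m*g positions are exactly the stride chunks
lemma pieces_closed (g : Int) (hg : 0 < g) (t : List Char) : ∀ (m : Nat),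
    pieces g t 0 ((m : Int) * g)
      = (List.range m).map (fun (k : Nat) => PySem.Chars.slice t (some (g * (k : Int))) (some (g * (k : Int) + g))) := by
  intro m
  induction m with
  | zero =>
    unfold pieces
    rw [PySem.List.pyRange_one_eq_nil (by simp)]
    simp
  | succ m ih =>
    have hsplit : PySem.List.pyRange 0 ((((m : Nat) + 1 : Nat) : Int) * g) 1
        = PySem.List.pyRange 0 ((m : Int) * g) 1 ++ PySem.List.pyRange ((m : Int) * g) ((m : Int) * g + g) 1 := by
      rw [← PySem.List.pyRange_one_append 0 ((m : Int) * g) ((m : Int) * g + g)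
        (by positivity) (by omega)]
      congr 1
      push_cast; ring
    have hblock : (PySem.List.pyRange ((m : Int) * g) ((m : Int) * g + g) 1).filter
        (fun k => PySem.Int.mod (k + 1) g == 0) = [(m : Int) * g + g - 1] := by
      have hsplit2 : PySem.List.pyRange ((m : Int) * g) ((m : Int) * g + g) 1
          = PySem.List.pyRange ((m : Int) * g) ((m : Int) * g + g - 1) 1 ++ [(m : Int) * g + g - 1] := by
        rw [← PySem.List.pyRange_one_singleton ((m : Int) * g + g - 1)]
        rw [← PySem.List.pyRange_one_append ((m : Int) * g) ((m : Int) * g + g - 1) ((m : Int) * g + g - 1 + 1)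
          (by omega) (by omega)]
        congr 1
        ring
      rw [hsplit2, List.filter_append]
      have h1 : (PySem.List.pyRange ((m : Int) * g) ((m : Int) * g + g - 1) 1).filter
          (fun k => PySem.Int.mod (k + 1) g == 0) = [] := by
        rw [List.filter_eq_nil_iff]
        intro k hk
        rw [PySem.List.mem_pyRange_one] at hk
        simp only [beq_iff_eq]
        intro hdvd
        rw [PySem.Int.mod_eq_zero_iff_dvd] at hdvd
        rcases hdvd with ⟨u, hu⟩
        have h2 : g * (m : Int) < g * u := by rw [mul_comm g ((m : Int))]; omega
        have h3 : g * u < g * ((m : Int) + 1) := by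
          have hx : g * ((m : Int) + 1) = (m : Int) * g + g := by ring
          omega
        have h4 : (m : Int) < u := lt_of_mul_lt_mul_left h2 (le_of_lt hg)
        have h5 : u < (m : Int) + 1 := lt_of_mul_lt_mul_left h3 (le_of_lt hg)
        omega
      rw [h1]
      have h2 : PySem.Int.mod ((m : Int) * g + g) g = 0 := by
        rw [PySem.Int.mod_eq_zero_iff_dvd]
        exact ⟨(m : Int) + 1, by ring⟩
      have h3 : ((m : Int) * g + g - 1 + 1) = (m : Int) * g + g := by ring
      simp [List.filter_cons, h3, h2]
    unfold pieces
    rw [hsplit, List.filter_append, hblock, List.map_append]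
    have ihu : ((PySem.List.pyRange 0 ((m : Int) * g) 1).filter (fun k => PySem.Int.mod (k + 1) g == 0)).map
        (fun k => PySem.Chars.slice t (some (k - g + 1)) (some (k + 1)))
        = (List.range m).map (fun (k : Nat) => PySem.Chars.slice t (some (g * (k : Int))) (some (g * (k : Int) + g))) := by
      have := ih
      unfold pieces at this
      exact this
    rw [ihu, List.range_succ, List.map_append]
    congr 1
    have e1 : ((m : Int) * g + g - 1) - g + 1 = g * (m : Int) := by ring
    have e2 : (m : Int) * g + g - 1 + 1 = g * (m : Int) + g := by ring
    simp only [List.map_cons, List.map_nil, e1, e2]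

lemma map_getD_range {α β : Type} (xs : List α) (d : α) (F : α → β) :
    (PySem.List.pyRange 0 (xs.length : Int) 1).map (fun i => F (PySem.List.pyGetD xs i d)) = xs.map F := by
  conv_rhs => rw [← PySem.List.map_pyGetD_pyRange_zero' xs d]
  rw [List.map_map]
  rfl

lemma pyRange_neg_nil (a b step : Int) (hs : step < 0) (hab : a ≤ b) :
    PySem.List.pyRange a b step = [] := by
  have h1 : ¬ (step = 0) := by omega
  have h2 : ¬ (0 < step) := by omega
  have h3 : ¬ (b < a) := by omega
  simp [PySem.List.pyRange, h1, h2, h3]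

lemma split₀_nil : PySem.Chars.split₀ [] = [] := by decide

lemma flatMap_pieces_neg (g : Int) (hg : g < 0) (t : List Char) (N : Int) :
    (pieces g t 0 N).flatMap PySem.Chars.split₀ = [] := by
  rw [List.flatMap_eq_nil_iff]
  intro p hp
  unfold pieces at hp
  rcases List.mem_map.mp hp with ⟨k, hk, rfl⟩
  have hk0 : 0 ≤ k := by
    have hmem := List.mem_of_mem_filter hk
    rw [PySem.List.mem_pyRange_one] at hmem
    omega
  have hsl : PySem.Chars.slice t (some (k - g + 1)) (some (k + 1)) = [] := by
    rw [PySem.Chars.slice_eq_listSlice, PySem.List.slice_toNat t (by omega) (by omega)]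
    have h0 : (k + 1).toNat - (k - g + 1).toNat = 0 := by omega
    rw [h0, List.take_zero]
  rw [hsl, split₀_nil]

lemma str_split₀_eq (x : String) :
    PySem.Str.split₀ x = (PySem.Chars.split₀ x.toList).map String.ofList := rfl

-- per-sequence equality of A's accumulated-and-split temp with B's chunk words
lemma body_eq (g : Int) (hg : g ≠ 0) (s : String) :
    PySem.Str.split₀
      ((PySem.List.pyRange 0
          (PySem.Str.len (if PySem.Int.mod (PySem.Str.len s) g ≠ 0 then
              padWhile g g.natAbs (PySem.Str.len s) s else s)) 1).foldl
        (fun (st : Int × String) k =>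
          ((st.1 + 1 : Int),
           if PySem.Int.mod (st.1 + 1) g = 0 then
             st.2 ++ PySem.Str.slice
               (if PySem.Int.mod (PySem.Str.len s) g ≠ 0 then
                  padWhile g g.natAbs (PySem.Str.len s) s else s)
               (some (k - g + 1)) (some (st.1 + 1)) ++ " "
           else st.2))
        (0, "")).2
    = ((PySem.List.pyRange 0
          (PySem.Str.len (s ++ String.ofList (PySem.List.pyRepeat ['P']
            (PySem.Int.mod (g - PySem.Int.mod (PySem.Str.len s) g) g)))) g).map
        (fun i => PySem.Str.slice
          (s ++ String.ofList (PySem.List.pyRepeat ['P']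
            (PySem.Int.mod (g - PySem.Int.mod (PySem.Str.len s) g) g)))
          (some i) (some (i + g)))).flatMap (fun c => PySem.Str.split₀ c) := by
  set tA : String := (if PySem.Int.mod (PySem.Str.len s) g ≠ 0 then
      padWhile g g.natAbs (PySem.Str.len s) s else s) with htAdef
  set pB : String := s ++ String.ofList (PySem.List.pyRepeat ['P']
      (PySem.Int.mod (g - PySem.Int.mod (PySem.Str.len s) g) g)) with hpBdef
  have hemp : ("" : String).toList = [] := by decide
  rcases lt_or_gt_of_ne hg with hgneg | hgpos
  · -- negative ngram: every appended slice is empty and B's stride range is empty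
    have hfold := chunkFold g tA tA.toList.length 0 ""
    rw [zero_add] at hfold
    have hlen : PySem.Str.len tA = ((tA.toList.length : Nat) : Int) := rfl
    rw [hlen, hfold]
    have hB : PySem.List.pyRange 0 (PySem.Str.len pB) g = [] :=
      pyRange_neg_nil _ _ _ hgneg (by simp [PySem.Str.len])
    rw [hB]
    simp only [List.map_nil, List.flatMap_nil]
    rw [str_split₀_eq]
    have : (("" : String) ++ String.ofList
        (((pieces g tA.toList 0 ((tA.toList.length : Nat) : Int)).map (fun p => p ++ [' '])).flatten)).toList
        = ((pieces g tA.toList 0 ((tA.toList.length : Nat) : Int)).map (fun p => p ++ [' '])).flatten := by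
      rw [String.toList_append, hemp, String.toList_ofList, List.nil_append]
    rw [this, split₀_flatten_space, flatMap_pieces_neg g hgneg]
    rfl
  · -- positive ngram
    have hconv : ∀ a : Int, PySem.Int.mod a g = a % g := fun _ => PySem.Int.mod_eq_emod_of_pos hgpos
    set L : Int := PySem.Str.len s with hLdef
    set r : Nat := (PySem.Int.mod (g - PySem.Int.mod L g) g).toNat with hrdef
    have hb1 : 0 ≤ (g - L % g) % g := Int.emod_nonneg _ (ne_of_gt hgpos)
    have hb2 : (g - L % g) % g < g := Int.emod_lt_of_pos _ hgpos
    have hrint : (r : Int) = (g - L % g) % g := by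
      rw [hrdef, hconv, hconv]
      omega
    have hBpad : pB.toList = s.toList ++ List.replicate r 'P' := by
      rw [hpBdef, String.toList_append, String.toList_ofList, PySem.List.pyRepeat_singleton]
    have htA : tA.toList = s.toList ++ List.replicate r 'P' := by
      rw [htAdef]
      by_cases hm : PySem.Int.mod L g = 0
      · rw [if_neg (by simp [hm])]
        have hm' : L % g = 0 := by rw [← hconv]; exact hm
        have hr0 : r = 0 := by
          have hz : (g - L % g) % g = 0 := by rw [hm', sub_zero, Int.emod_self]
          omega
        rw [hr0]
        simp
      · rw [if_pos hm]
        have hbound : ((g - PySem.Int.mod L g) % g).toNat ≤ g.natAbs := by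
          rw [hconv]
          omega
        rw [padWhile_toList g hgpos g.natAbs L s rfl hbound]
        have heq : ((g - PySem.Int.mod L g) % g).toNat = r := by
          rw [hconv]
          omega
        rw [heq]
    have htApB : tA = pB := str_ext (htA.trans hBpad.symm)
    rw [htApB]
    -- the padded length is a multiple of g
    have hdvd : g ∣ ((pB.toList.length : Nat) : Int) := by
      have hlen2 : (pB.toList.length : Int) = L + r := by
        rw [hBpad]
        simp [hLdef, PySem.Str.len]
      rw [hlen2]
      by_cases hm : PySem.Int.mod L g = 0
      · have hm' : L % g = 0 := by rw [← hconv]; exact hm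
        have hr0 : (r : Int) = 0 := by
          rw [hrint, hm', sub_zero, Int.emod_self]
        rw [hr0, add_zero]
        rw [← PySem.Int.mod_eq_zero_iff_dvd]
        exact hm
      · have hmz : L % g ≠ 0 := by rw [← hconv]; exact hm
        have he1 : 0 ≤ L % g := Int.emod_nonneg _ (ne_of_gt hgpos)
        have he2 : L % g < g := Int.emod_lt_of_pos _ hgpos
        have hr1 : (r : Int) = g - L % g := by
          rw [hrint]
          exact Int.emod_eq_of_lt (by omega) (by omega)
        have hdm := Int.ediv_add_emod L g
        have hexp : g * (L / g + 1) = g * (L / g) + g := by ring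
        exact ⟨L / g + 1, by omega⟩
    obtain ⟨q, hq⟩ := hdvd
    have hq0 : 0 ≤ q := by
      by_contra h
      push_neg at h
      have : g * q < 0 := mul_neg_of_pos_of_neg hgpos h
      omega
    have hm2 : ((pB.toList.length : Nat) : Int) = (q.toNat : Int) * g := by
      rw [hq]
      rw [Int.toNat_of_nonneg hq0]
      ring
    -- A side: run the counter loop
    have hfold := chunkFold g pB pB.toList.length 0 ""
    rw [zero_add] at hfold
    have hlen : PySem.Str.len pB = ((pB.toList.length : Nat) : Int) := rfl
    rw [hlen, hfold]
    rw [str_split₀_eq]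
    have hTL : (("" : String) ++ String.ofList
        (((pieces g pB.toList 0 ((pB.toList.length : Nat) : Int)).map (fun p => p ++ [' '])).flatten)).toList
        = ((pieces g pB.toList 0 ((pB.toList.length : Nat) : Int)).map (fun p => p ++ [' '])).flatten := by
      rw [String.toList_append, hemp, String.toList_ofList, List.nil_append]
    rw [hTL, split₀_flatten_space]
    rw [hm2, pieces_closed g hgpos pB.toList q.toNat, stride_range g hgpos q.toNat]
    -- both sides are now maps over List.range q.toNat
    generalize List.range q.toNat = l
    induction l with
    | nil => rfl
    | cons x xs ih =>
      simp only [List.map_cons, List.flatMap_cons, List.map_append, ih]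
      have hhead : (PySem.Chars.split₀ (PySem.Chars.slice pB.toList (some (g * (x : Int))) (some (g * (x : Int) + g)))).map String.ofList
          = PySem.Str.split₀ (PySem.Str.slice pB (some (g * (x : Int))) (some (g * (x : Int) + g))) := by
        rw [str_split₀_eq, PySem.Str.toList_slice]
      rw [hhead]

-- ===== VERDICT (by name: the statement is the Claim_ definition above) =====
theorem convert_seqs_to_words_spec : Claim_equal_convert_seqs_to_words := by
  intro sequences ngram hdom hpre
  unfold Spec_convert_seqs_to_words
  by_cases hg : ngram = 0
  · rcases hpre with hnil | hne
    · subst hnil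
      rfl
    · exact absurd hg hne
  · unfold convert_seqs_to_words convert_seqs_to_words_alt
    dsimp only
    rw [PySem.List.foldl_append_singleton_eq_map]
    rw [List.nil_append, List.map_map]
    simp only [Function.comp_def]
    rw [map_getD_range sequences ""
      (fun s => PySem.Str.split₀
        ((PySem.List.pyRange 0
            (PySem.Str.len (if PySem.Int.mod (PySem.Str.len s) ngram ≠ 0 then
                padWhile ngram ngram.natAbs (PySem.Str.len s) s else s)) 1).foldl
          (fun (st : Int × String) k =>
            ((st.1 + 1 : Int),
             if PySem.Int.mod (st.1 + 1) ngram = 0 then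
               st.2 ++ PySem.Str.slice
                 (if PySem.Int.mod (PySem.Str.len s) ngram ≠ 0 then
                    padWhile ngram ngram.natAbs (PySem.Str.len s) s else s)
                 (some (k - ngram + 1)) (some (st.1 + 1)) ++ " "
             else st.2))
          (0, "")).2)]
    apply List.map_congr_left
    intro s _
    exact body_eq ngram hg s
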